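-- pv_equiv track=rewrite | github.com/bitcoinordeath/nodeyez | scripts/vicariousbitcoin.py | getnodeaddress
-- ===== SOURCE A (Python) =====
-- def getnodeaddress(nodeinfo):
--     bestresult = ""
--     for addr in nodeinfo["node"]["addresses"]:
--         nodehostandport = addr["addr"]
--         if bestresult == "":
--             bestresult = nodehostandport
--         elif "onion" in nodehostandport:
--             if "onion" not in bestresult:
--                 bestresult = nodehostandport
--             elif len(nodehostandport) > 56:
--                 bestresult = nodehostandport
--     return bestresult
-- ===== SOURCE B (Python) =====
-- def getnodeaddress(nodeinfo):
--     hosts = [addr["addr"] for addr in nodeinfo["node"]["addresses"]]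
--     onions = [h for h in hosts if "onion" in h]
--     if not onions:
--         return next((h for h in hosts if h != ""), "")
--     best = onions[0]
--     for s in onions[1:]:
--         if len(s) > 56:
--             best = s
--     return best
-- ===== Notes on version B (the rewrite author's own statement) =====
-- stated objective: simpler
-- what changed: Replaces the single interleaved state-machine loop over all addresses by a filter-then-scan decomposition: extract the onion addresses once, take the first as the base and let later onions longer than 56 chars override it; with no onions, return the first non-empty address.
import Mathlib
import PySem

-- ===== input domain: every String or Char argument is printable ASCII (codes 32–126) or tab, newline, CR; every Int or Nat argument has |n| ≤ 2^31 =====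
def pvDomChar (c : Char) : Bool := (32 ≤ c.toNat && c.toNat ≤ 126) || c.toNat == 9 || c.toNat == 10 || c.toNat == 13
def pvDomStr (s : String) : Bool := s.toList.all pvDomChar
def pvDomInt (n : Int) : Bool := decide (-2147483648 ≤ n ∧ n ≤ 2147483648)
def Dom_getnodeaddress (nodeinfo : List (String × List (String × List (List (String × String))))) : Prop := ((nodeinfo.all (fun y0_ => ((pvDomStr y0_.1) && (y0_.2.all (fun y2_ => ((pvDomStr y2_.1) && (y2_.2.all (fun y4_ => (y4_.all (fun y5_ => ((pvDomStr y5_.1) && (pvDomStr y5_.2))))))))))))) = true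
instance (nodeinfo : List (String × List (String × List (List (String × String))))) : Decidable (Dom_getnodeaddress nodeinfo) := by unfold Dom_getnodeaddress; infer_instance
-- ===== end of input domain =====

-- ===== PORT A =====

-- B replaces A's interleaved state-machine loop by a filter-the-onions-then-scan decomposition (return value only).
-- ===== PORT A =====
-- '"onion" in s'
def pvOnion (s : String) : Bool := PySem.Str.isIn "onion" s

-- A's loop step: the body of 'for addr in …' acting on bestresult (branches in A's order)
def pvStepA (bestresult nodehostandport : String) : String :=
  if bestresult = "" then nodehostandport
  else if pvOnion nodehostandport then
    if ¬ (pvOnion bestresult) then nodehostandport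
    else if PySem.Str.len nodehostandport > 56 then nodehostandport
    else bestresult
  else bestresult

def getnodeaddress (nodeinfo : List (String × List (String × List (List (String × String))))) : String :=
  (PySem.Dict.getD (PySem.Dict.mk ((PySem.Dict.getD (PySem.Dict.mk nodeinfo) "node" []))) "addresses" []).foldl
    (fun bestresult addr => pvStepA bestresult (PySem.Dict.getD (PySem.Dict.mk addr) "addr" "")) ""

-- ===== PORT B =====
-- B's replacement step: 'if len(s) > 56: best = s'
def pvStepB (best s : String) : String :=
  if PySem.Str.len s > 56 then s else best

def getnodeaddress_alt (nodeinfo : List (String × List (String × List (List (String × String))))) : String :=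
  let hosts := (PySem.Dict.getD (PySem.Dict.mk ((PySem.Dict.getD (PySem.Dict.mk nodeinfo) "node" []))) "addresses" []).map
    (fun addr => PySem.Dict.getD (PySem.Dict.mk addr) "addr" "")
  match hosts.filter (fun h => pvOnion h) with
  | [] => (hosts.filter (fun h => h ≠ "")).headD ""
  | o :: rest => rest.foldl pvStepB o

-- ===== PRECONDITION & SPEC =====
-- Pre_ excludes exactly the inputs where Python A raises KeyError: a missing "node" or
-- "addresses" key, or an address dict without an "addr" key.
def Pre_getnodeaddress (nodeinfo : List (String × List (String × List (List (String × String))))) : Prop :=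
  PySem.Dict.contains (PySem.Dict.mk nodeinfo) "node" = true ∧
  PySem.Dict.contains (PySem.Dict.mk (PySem.Dict.getD (PySem.Dict.mk nodeinfo) "node" [])) "addresses" = true ∧
  (PySem.Dict.getD (PySem.Dict.mk ((PySem.Dict.getD (PySem.Dict.mk nodeinfo) "node" []))) "addresses" []).all
    (fun addr => PySem.Dict.contains (PySem.Dict.mk addr) "addr") = true
instance (nodeinfo : List (String × List (String × List (List (String × String))))) : Decidable (Pre_getnodeaddress nodeinfo) := by unfold Pre_getnodeaddress; infer_instance
def pvWitness_getnodeaddress : (List (String × List (String × List (List (String × String))))) :=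
  [("node", [("addresses", [[("addr", "abc.onion")], [("addr", "example.com")]])])]

def Spec_getnodeaddress (nodeinfo : List (String × List (String × List (List (String × String))))) (out : String) : Prop := out = getnodeaddress_alt nodeinfo
instance (nodeinfo : List (String × List (String × List (List (String × String))))) (out : String) : Decidable (Spec_getnodeaddress nodeinfo out) := by unfold Spec_getnodeaddress; infer_instance

-- ===== CLAIM (what is proved, stated in full; the proofs are below) =====
def Claim_equal_getnodeaddress : Prop := ∀ (nodeinfo : List (String × List (String × List (List (String × String))))), Dom_getnodeaddress nodeinfo → Pre_getnodeaddress nodeinfo → Spec_getnodeaddress nodeinfo (getnodeaddress nodeinfo)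

-- ===== LEMMAS AND PROOFS =====

theorem onion_ne_empty {b : String} (h : pvOnion b = true) : b ≠ "" := by
  intro hb; subst hb; exact absurd h (by decide)

-- Once bestresult contains "onion", A's loop is exactly B's scan over the remaining onions.
theorem foldA_of_onion (hosts : List String) :
    ∀ b, pvOnion b = true →
      hosts.foldl pvStepA b = (hosts.filter (fun h => pvOnion h)).foldl pvStepB b := by
  induction hosts with
  | nil => intro b _; rfl
  | cons h t ih =>
    intro b hb
    rw [List.foldl_cons, List.filter_cons]
    by_cases ho : pvOnion h = true
    · have hstep : pvStepA b h = pvStepB b h := by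
        simp only [pvStepA, pvStepB, onion_ne_empty hb, hb, ho, if_false, if_true,
          not_true, ite_false, ite_true]
      rw [hstep, ho, if_pos rfl, List.foldl_cons]
      apply ih
      have : pvStepB b h = h ∨ pvStepB b h = b := by
        unfold pvStepB; split
        · exact Or.inl rfl
        · exact Or.inr rfl
      rcases this with h1 | h1 <;> rw [h1] <;> assumption
    · have ho' : pvOnion h = false := by simpa using ho
      have hstep : pvStepA b h = b := by
        simp only [pvStepA, onion_ne_empty hb, ho', if_false, Bool.false_eq_true]
      rw [hstep, ho', if_neg (by simp), ih b hb]

-- With a non-empty non-onion bestresult, A's loop result is the first onion scanned by B,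
-- or bestresult if no onion follows.
theorem foldA_of_plain (hosts : List String) :
    ∀ b, b ≠ "" → pvOnion b = false →
      hosts.foldl pvStepA b =
        (match hosts.filter (fun h => pvOnion h) with
         | [] => b
         | o :: rest => rest.foldl pvStepB o) := by
  induction hosts with
  | nil => intro b _ _; rfl
  | cons h t ih =>
    intro b hb hbo
    rw [List.foldl_cons, List.filter_cons]
    by_cases ho : pvOnion h = true
    · have hstep : pvStepA b h = h := by
        simp only [pvStepA, hb, ho, hbo, if_false, ite_true, Bool.false_eq_true, not_false_iff]
      rw [hstep, ho, if_pos rfl]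
      exact foldA_of_onion t h ho
    · have ho' : pvOnion h = false := by simpa using ho
      have hstep : pvStepA b h = b := by
        simp only [pvStepA, hb, ho', if_false, Bool.false_eq_true]
      rw [hstep, ho', if_neg (by simp), ih b hb hbo]

-- From the initial empty bestresult, A's loop computes B's filter-then-scan result.
theorem foldA_main (hosts : List String) :
    hosts.foldl pvStepA "" =
      (match hosts.filter (fun h => pvOnion h) with
       | [] => (hosts.filter (fun h => h ≠ "")).headD ""
       | o :: rest => rest.foldl pvStepB o) := by
  induction hosts with
  | nil => rfl
  | cons h t ih =>
    rw [List.foldl_cons]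
    have hstep : pvStepA "" h = h := by simp [pvStepA]
    rw [hstep]
    by_cases ho : pvOnion h = true
    · have hf : (h :: t).filter (fun h => pvOnion h) = h :: t.filter (fun h => pvOnion h) := by
        rw [List.filter_cons, ho]; simp
      rw [hf]
      exact foldA_of_onion t h ho
    · have ho' : pvOnion h = false := by simpa using ho
      have hf : (h :: t).filter (fun h => pvOnion h) = t.filter (fun h => pvOnion h) := by
        rw [List.filter_cons, ho']; simp
      rw [hf]
      by_cases he : h = ""
      · subst he
        have hf2 : ("" :: t).filter (fun h => h ≠ "") = t.filter (fun h => h ≠ "") := by simp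
        rw [hf2]
        exact ih
      · have hf2 : (h :: t).filter (fun h => h ≠ "") = h :: t.filter (fun h => h ≠ "") := by
          simp [he]
        rw [hf2, foldA_of_plain t h he ho']
        cases hf3 : t.filter (fun h => pvOnion h) with
        | nil => simp
        | cons o rest => simp

-- ===== VERDICT (by name: the statement is the Claim_ definition above) =====
theorem getnodeaddress_spec : Claim_equal_getnodeaddress := by
  intro nodeinfo _ _
  unfold Spec_getnodeaddress getnodeaddress getnodeaddress_alt
  rw [← List.foldl_map]
  exact foldA_main _
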